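-- pv_equiv track=rewrite | github.com/IliasIB/advent-of-code-2023 | day03/day03.py | get_gear_count
-- ===== SOURCE A (Python) =====
-- def get_gear_count(gears_matrix, gear_marks):
--     gear_count = 0
--     for y in range(len(gears_matrix)):
--         current_number = ''
--         for x in range(len(gears_matrix[0])):
--             if gears_matrix[y][x].isnumeric() and gear_marks[y][x]:
--                 current_number += gears_matrix[y][x]
--                 if x == len(gears_matrix[0]) - 1:
--                     gear_count += int(current_number)
--             elif current_number != '':
--                 gear_count += int(current_number)
--                 current_number = ''
--     return gear_count
-- ===== SOURCE B (Python) =====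
-- def get_gear_count(gears_matrix, gear_marks):
--     total = 0
--     for y in range(len(gears_matrix)):
--         masked = ''.join(
--             gears_matrix[y][x]
--             if gears_matrix[y][x].isnumeric() and gear_marks[y][x] else ' '
--             for x in range(len(gears_matrix[0])))
--         total += sum(int(token) for token in masked.split())
--     return total
-- ===== Notes on version B (the rewrite author's own statement) =====
-- stated objective: idiomatic
-- what changed: Replaces A's stateful per-cell current_number accumulation with its end-of-run and end-of-row flush branches by a per-row build-a-masked-string (spaces over unmarked/non-digit cells), then .split() and sum of int over the tokens.
import Mathlib
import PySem

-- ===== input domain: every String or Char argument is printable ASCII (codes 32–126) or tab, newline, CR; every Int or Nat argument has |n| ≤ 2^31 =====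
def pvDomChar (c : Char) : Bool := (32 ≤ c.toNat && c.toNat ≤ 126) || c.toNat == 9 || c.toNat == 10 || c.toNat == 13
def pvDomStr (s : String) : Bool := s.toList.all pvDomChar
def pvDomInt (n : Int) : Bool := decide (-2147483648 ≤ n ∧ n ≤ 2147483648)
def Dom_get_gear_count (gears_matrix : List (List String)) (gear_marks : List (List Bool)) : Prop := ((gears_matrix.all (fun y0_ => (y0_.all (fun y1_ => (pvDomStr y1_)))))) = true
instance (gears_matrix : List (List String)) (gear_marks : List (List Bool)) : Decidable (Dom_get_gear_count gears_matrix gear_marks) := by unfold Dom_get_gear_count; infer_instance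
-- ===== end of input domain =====

-- B replaces A's stateful current_number accumulation and end-of-run/end-of-row flush logic with a
-- per-row build-mask-then-tokenize decomposition (mask the unmarked/non-digit cells with spaces,
-- then sum the int of each whitespace-separated token); objective: idiomatic, not faster.
-- On the ASCII input domain Dom_, Python's str.isnumeric coincides with str.isdigit and is ported
-- as PySem.Str.strIsdigit.

-- ===== PORT A =====
def get_gear_count (gears_matrix : List (List String)) (gear_marks : List (List Bool)) : Int :=
  (PySem.List.pyRange 0 gears_matrix.length 1).foldl (fun gear_count y =>
    -- current_number is kept as a List Char (kernel-transparent form of the Python str)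
    let n : Int := ((PySem.List.pyGetD gears_matrix 0 []).length : Int)
    ((PySem.List.pyRange 0 n 1).foldl (fun (st : List Char × Int) x =>
        let cell := PySem.List.pyGetD (PySem.List.pyGetD gears_matrix y []) x ""
        if PySem.Str.strIsdigit cell && PySem.List.pyGetD (PySem.List.pyGetD gear_marks y []) x false then
          let current_number := st.1 ++ cell.toList
          if x = n - 1 then (current_number, st.2 + (PySem.Int.ofChars? current_number).getD 0)
          else (current_number, st.2)
        else if st.1 ≠ [] then ([], st.2 + (PySem.Int.ofChars? st.1).getD 0)
        else st)
      ([], gear_count)).2) 0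

-- ===== PORT B =====
def get_gear_count_alt (gears_matrix : List (List String)) (gear_marks : List (List Bool)) : Int :=
  (PySem.List.pyRange 0 gears_matrix.length 1).foldl (fun total y =>
    let n : Int := ((PySem.List.pyGetD gears_matrix 0 []).length : Int)
    -- masked = ''.join(cell if cell.isnumeric() and mark else ' ' for x in range(n))
    let masked : List Char := PySem.Chars.join []
      ((PySem.List.pyRange 0 n 1).map (fun x =>
        let cell := PySem.List.pyGetD (PySem.List.pyGetD gears_matrix y []) x ""
        if PySem.Str.strIsdigit cell && PySem.List.pyGetD (PySem.List.pyGetD gear_marks y []) x false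
        then cell.toList else [' ']))
    -- total += sum(int(token) for token in masked.split())
    total + ((PySem.Chars.split₀ masked).map (fun t => (PySem.Int.ofChars? t).getD 0)).sum) 0

-- ===== PRECONDITION & SPEC =====
-- Pre_ excludes exactly the inputs on which the Python A raises IndexError: some consulted cell is
-- missing — a row of gears_matrix shorter than row 0, or a mark entry gear_marks[y][x] that the
-- short-circuiting condition actually evaluates (only where the cell is numeric) and that is absent.
def Pre_get_gear_count (gears_matrix : List (List String)) (gear_marks : List (List Bool)) : Prop :=
  ∀ y, y < gears_matrix.length →
    (gears_matrix.headD []).length ≤ (gears_matrix.getD y []).length ∧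
    ∀ x, x < (gears_matrix.headD []).length →
      PySem.Str.strIsdigit ((gears_matrix.getD y []).getD x "") = true →
      y < gear_marks.length ∧ x < (gear_marks.getD y []).length
instance (gears_matrix : List (List String)) (gear_marks : List (List Bool)) : Decidable (Pre_get_gear_count gears_matrix gear_marks) := by unfold Pre_get_gear_count; infer_instance

def pvWitness_get_gear_count : List (List String) × List (List Bool) :=
  ([["1", "2"], ["a", "3"]], [[true, false], [true, true]])

def Spec_get_gear_count (gears_matrix : List (List String)) (gear_marks : List (List Bool)) (out : Int) : Prop := out = get_gear_count_alt gears_matrix gear_marks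
instance (gears_matrix : List (List String)) (gear_marks : List (List Bool)) (out : Int) : Decidable (Spec_get_gear_count gears_matrix gear_marks out) := by unfold Spec_get_gear_count; infer_instance

-- ===== CLAIM (what is proved, stated in full; the proofs are below) =====
def Claim_equal_get_gear_count : Prop := ∀ (gears_matrix : List (List String)) (gear_marks : List (List Bool)), Dom_get_gear_count gears_matrix gear_marks → Pre_get_gear_count gears_matrix gear_marks → Spec_get_gear_count gears_matrix gear_marks (get_gear_count gears_matrix gear_marks)

-- ===== LEMMAS AND PROOFS =====

-- int(t), defaulted (under Dom every flushed token is a nonempty digit string, so the default is unreachable)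
def pvIntD (t : List Char) : Int := (PySem.Int.ofChars? t).getD 0

def pvSumTok (ts : List (List Char)) : Int := (ts.map pvIntD).sum

-- A's inner step with the end-of-row flush removed (the flush is applied afterwards by pvFin)
def pvStep (p : Nat → Bool) (c : Nat → List Char) (st : List Char × Int) (i : Nat) : List Char × Int :=
  if p i then (st.1 ++ c i, st.2)
  else if st.1 = [] then st else ([], st.2 + pvIntD st.1)

def pvFin (st : List Char × Int) : Int := if st.1 = [] then st.2 else st.2 + pvIntD st.1

lemma pvJoinNil (ps : List (List Char)) : PySem.Chars.join [] ps = ps.flatten := by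
  induction ps with
  | nil => rfl
  | cons x t ih =>
    cases t with
    | nil => simp [PySem.Chars.join, List.intercalate]
    | cons y u => simp_all [PySem.Chars.join, List.intercalate]

lemma pvDigitNotSpace (c : Char) (h : PySem.Chars.isdigit c = true) :
    PySem.Chars.isspace c = false := by
  simp only [PySem.Chars.isdigit, Bool.and_eq_true, decide_eq_true_eq] at h
  have h1 : 48 ≤ c.toNat := by exact_mod_cast h.1
  have h2 : c.toNat ≤ 57 := by exact_mod_cast h.2
  simp only [PySem.Chars.isspace, Bool.or_eq_false_iff, Bool.and_eq_false_iff,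
    decide_eq_false_iff_not]
  omega

lemma pvGoNil (cur : List Char) (acc : List (List Char)) :
    PySem.Chars.split₀.go [] cur acc =
      if cur.isEmpty then acc.reverse else (cur.reverse :: acc).reverse := rfl

lemma pvGoNonspace (c : Char) (h : PySem.Chars.isspace c = false) (t cur acc) :
    PySem.Chars.split₀.go (c :: t) cur acc = PySem.Chars.split₀.go t (c :: cur) acc := by
  simp [PySem.Chars.split₀.go, h]

lemma pvGoSpace (t cur acc) :
    PySem.Chars.split₀.go (' ' :: t) cur acc =
      PySem.Chars.split₀.go t [] (if cur.isEmpty then acc else cur.reverse :: acc) := by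
  rw [PySem.Chars.split₀.go]
  have hs : PySem.Chars.isspace ' ' = true := by decide
  rw [hs]
  simp only [if_true]
  split <;> simp_all

lemma pvGoAppend (cs : List Char) (h : cs.all (fun ch => !PySem.Chars.isspace ch) = true)
    (t cur acc) :
    PySem.Chars.split₀.go (cs ++ t) cur acc = PySem.Chars.split₀.go t (cs.reverse ++ cur) acc := by
  induction cs generalizing cur with
  | nil => simp
  | cons c cs ih =>
    simp only [List.all_cons, Bool.and_eq_true, Bool.not_eq_eq_eq_not, Bool.not_true] at h
    rw [List.cons_append, pvGoNonspace c h.1, ih (by simpa using h.2)]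
    simp

lemma pvFoldShift (l : List Nat) (p : Nat → Bool) (c : Nat → List Char)
    (cur : List Char) (a k : Int) :
    l.foldl (pvStep p c) (cur, a + k) =
      ((l.foldl (pvStep p c) (cur, a)).1, (l.foldl (pvStep p c) (cur, a)).2 + k) := by
  induction l generalizing cur a with
  | nil => rfl
  | cons i l ih =>
    simp only [List.foldl_cons]
    by_cases hp : p i
    · simpa [pvStep, hp] using ih (cur ++ c i) a
    · by_cases hc : cur = []
      · simpa [pvStep, hp, hc] using ih cur a
      · have hcomm : a + k + pvIntD cur = a + pvIntD cur + k := by ring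
        simpa [pvStep, hp, hc, hcomm] using ih [] (a + pvIntD cur)

lemma pvFinShift (l : List Nat) (p : Nat → Bool) (c : Nat → List Char)
    (cur : List Char) (a k : Int) :
    pvFin (l.foldl (pvStep p c) (cur, a + k)) = pvFin (l.foldl (pvStep p c) (cur, a)) + k := by
  rw [pvFoldShift]
  unfold pvFin
  split <;> ring

-- A's indexed inner loop (with its x == n-1 flush) equals the flush-free fold finished by pvFin.
lemma pvRowA (n : Nat) (p : Nat → Bool) (c : Nat → List Char)
    (hne : ∀ i, i < n → p i = true → c i ≠ []) (a : Int) :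
    ((List.range n).foldl (fun (st : List Char × Int) i =>
        if p i then
          (if i + 1 = n then (st.1 ++ c i, st.2 + pvIntD (st.1 ++ c i)) else (st.1 ++ c i, st.2))
        else if st.1 ≠ [] then ([], st.2 + pvIntD st.1) else st)
      (([], a) : List Char × Int)).2 =
    pvFin ((List.range n).foldl (pvStep p c) ([], a)) := by
  cases n with
  | zero => simp [pvFin]
  | succ m =>
    rw [List.range_succ, List.foldl_append, List.foldl_append]
    rw [PySem.List.foldl_congr_mem (List.range m) _ (pvStep p c) ([], a)
      (by
        intro acc i hi
        have him : i < m := List.mem_range.mp hi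
        by_cases hp : p i
        · simp [pvStep, hp, show i ≠ m by omega]
        · by_cases hc : acc.1 = [] <;> simp [pvStep, hp, hc])]
    set S := (List.range m).foldl (pvStep p c) (([], a) : List Char × Int) with hS
    simp only [List.foldl_cons, List.foldl_nil]
    by_cases hp : p m
    · have hcm : c m ≠ [] := hne m (by omega) hp
      have hne2 : S.1 ++ c m ≠ [] := by simp [hcm]
      simp [pvStep, hp, pvFin, hne2]
    · by_cases hc : S.1 = []
      · simp [pvStep, hp, hc, pvFin]
      · simp [pvStep, hp, hc, pvFin]

-- B's masked row, tokenized by split(), sums to the same value as the flush-free fold.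
lemma pvRowB (l : List Nat) (p : Nat → Bool) (c : Nat → List Char)
    (hns : ∀ i ∈ l, p i = true → (c i).all (fun ch => !PySem.Chars.isspace ch) = true)
    (cur : List Char) (hcur : cur.all (fun ch => !PySem.Chars.isspace ch) = true)
    (a : Int) (toks : List (List Char)) :
    a + pvSumTok (PySem.Chars.split₀.go
        ((l.map (fun i => if p i then c i else [' '])).flatten) cur.reverse toks) =
      pvSumTok toks.reverse + pvFin (l.foldl (pvStep p c) (cur, a)) := by
  induction l generalizing cur a toks with
  | nil =>
    rw [List.map_nil, List.flatten_nil, pvGoNil]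
    by_cases hc : cur = []
    · simp [hc, pvFin, pvSumTok]
      ring
    · simp [hc, pvFin, pvSumTok, pvIntD]
      ring
  | cons i l ih =>
    simp only [List.map_cons, List.flatten_cons, List.foldl_cons]
    by_cases hp : p i
    · rw [if_pos hp, pvGoAppend (c i) (hns i (by simp) hp)]
      rw [show (c i).reverse ++ cur.reverse = (cur ++ c i).reverse by simp]
      have hcur2 : (cur ++ c i).all (fun ch => !PySem.Chars.isspace ch) = true := by
        rw [List.all_append]
        simp [hcur, hns i (by simp) hp]
      rw [ih (fun j hj => hns j (by simp [hj]) ) (cur ++ c i) hcur2 a toks]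
      simp [pvStep, hp]
    · rw [if_neg hp]
      simp only [List.singleton_append]
      rw [pvGoSpace]
      by_cases hc : cur = []
      · subst hc
        have h2 := ih (fun j hj => hns j (by simp [hj])) [] (by simp) a toks
        simp only [List.reverse_nil] at h2
        simpa [pvStep, hp] using h2
      · have hne : cur.reverse.isEmpty = false := by simpa [List.isEmpty_iff] using hc
        rw [hne]
        simp only [Bool.false_eq_true, if_false, List.reverse_reverse]
        have h2 := ih (fun j hj => hns j (by simp [hj])) [] (by simp) a (cur :: toks)
        simp only [List.reverse_nil] at h2
        rw [h2]
        simp only [pvStep, hp, Bool.false_eq_true, if_false, if_neg hc]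
        rw [pvFinShift]
        simp only [pvSumTok, List.reverse_cons, List.map_append, List.sum_append,
          List.map_cons, List.map_nil, List.sum_cons, List.sum_nil]
        ring

-- Nat-indexed core: A's row loop equals B's mask-split-sum for any cell predicate/content
lemma pvRowEqNat (m : Nat) (p : Nat → Bool) (c : Nat → List Char)
    (hdig : ∀ i, p i = true → PySem.Chars.strIsdigit (c i) = true) (total : Int) :
    ((List.range m).foldl (fun (st : List Char × Int) i =>
        if p i then
          (if i + 1 = m then (st.1 ++ c i, st.2 + pvIntD (st.1 ++ c i)) else (st.1 ++ c i, st.2))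
        else if st.1 ≠ [] then ([], st.2 + pvIntD st.1) else st)
      (([], total) : List Char × Int)).2 =
    total + pvSumTok (PySem.Chars.split₀
      (((List.range m).map (fun i => if p i then c i else [' '])).flatten)) := by
  have hne : ∀ i, i < m → p i = true → c i ≠ [] := by
    intro i _ hp
    have hd := hdig i hp
    simp only [PySem.Chars.strIsdigit, Bool.and_eq_true, Bool.not_eq_eq_eq_not, Bool.not_true,
      List.isEmpty_eq_false_iff] at hd
    exact hd.1
  have hns : ∀ i ∈ List.range m, p i = true →
      (c i).all (fun ch => !PySem.Chars.isspace ch) = true := by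
    intro i _ hp
    have hd := hdig i hp
    simp only [PySem.Chars.strIsdigit, Bool.and_eq_true, List.all_eq_true] at hd
    simp only [List.all_eq_true, Bool.not_eq_eq_eq_not, Bool.not_true]
    intro ch hch
    exact pvDigitNotSpace ch (by simpa using hd.2 ch hch)
  rw [pvRowA m p c hne total]
  have hb := pvRowB (List.range m) p c hns [] (by simp) total []
  simp only [List.reverse_nil, pvSumTok, List.map_nil, List.sum_nil, zero_add] at hb
  simp only [PySem.Chars.split₀]
  rw [← hb]
  simp [pvSumTok]

-- the two row bodies agree for every row index y and every running total
lemma pvRowEq (gears_matrix : List (List String)) (gear_marks : List (List Bool))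
    (total : Int) (y : Int) :
    ((PySem.List.pyRange 0 ((PySem.List.pyGetD gears_matrix 0 []).length : Int) 1).foldl
        (fun (st : List Char × Int) x =>
        let cell := PySem.List.pyGetD (PySem.List.pyGetD gears_matrix y []) x ""
        if PySem.Str.strIsdigit cell && PySem.List.pyGetD (PySem.List.pyGetD gear_marks y []) x false then
          let current_number := st.1 ++ cell.toList
          if x = ((PySem.List.pyGetD gears_matrix 0 []).length : Int) - 1 then
            (current_number, st.2 + (PySem.Int.ofChars? current_number).getD 0)
          else (current_number, st.2)
        else if st.1 ≠ [] then ([], st.2 + (PySem.Int.ofChars? st.1).getD 0)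
        else st)
      ([], total)).2 =
    total + ((PySem.Chars.split₀ (PySem.Chars.join []
       ((PySem.List.pyRange 0 ((PySem.List.pyGetD gears_matrix 0 []).length : Int) 1).map (fun x =>
         let cell := PySem.List.pyGetD (PySem.List.pyGetD gears_matrix y []) x ""
         if PySem.Str.strIsdigit cell && PySem.List.pyGetD (PySem.List.pyGetD gear_marks y []) x false
         then cell.toList else [' '])))).map (fun t => (PySem.Int.ofChars? t).getD 0)).sum := by
  have hcond : ∀ (i mm : Nat), ((i : Int) = (mm : Int) - 1) = (i + 1 = mm) := by
    intro i mm; apply propext; omega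
  simp only [PySem.List.pyRange_zero_natCast, List.foldl_map, List.map_map, pvJoinNil, hcond]
  exact pvRowEqNat (PySem.List.pyGetD gears_matrix 0 []).length
    (fun i => PySem.Str.strIsdigit (PySem.List.pyGetD (PySem.List.pyGetD gears_matrix y []) (i : Int) "") &&
      PySem.List.pyGetD (PySem.List.pyGetD gear_marks y []) (i : Int) false)
    (fun i => (PySem.List.pyGetD (PySem.List.pyGetD gears_matrix y []) (i : Int) "").toList)
    (by
      intro i hp
      simp only [PySem.Str.strIsdigit, Bool.and_eq_true] at hp
      exact hp.1)
    total

-- ===== VERDICT (by name: the statement is the Claim_ definition above) =====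
theorem get_gear_count_spec : Claim_equal_get_gear_count := by
  intro gears_matrix gear_marks _hdom _hpre
  unfold Spec_get_gear_count get_gear_count get_gear_count_alt
  refine PySem.List.foldl_congr_mem _ _ _ _ ?_
  intro acc y _hy
  exact pvRowEq gears_matrix gear_marks acc y
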